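-- pv_equiv track=rewrite | github.com/NT-me/STL_DAAR | kmp.py | precalcul
-- ===== SOURCE A (Python) =====
-- def precalcul(s):
--     carryOver = [0]
--     for i in range(1, len(s)):
--         carryOver.append(0)
--         suffix = s[i]
--         prefix = ""
--         for j in range(i):
--             prefix += s[j]
--             if suffix in prefix:
--                 carryOver[i] += 1
--                 if i-len(suffix) > 0:
--                     suffix = s[i-len(suffix)] + suffix
--                 else:
--                     break
--
--     return carryOver
-- ===== SOURCE B (Python) =====
-- def precalcul(s):
--     # For each i, the count equals the length of the longest suffix of s[:i+1]
--     # that also occurs as a substring of s[:i]; found by a monotone search.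
--     carryOver = [0]
--     for i in range(1, len(s)):
--         m = 0
--         while m < i and s[i - m:i + 1] in s[:i]:
--             m += 1
--         carryOver.append(m)
--     return carryOver
-- ===== Notes on version B (the rewrite author's own statement) =====
-- stated objective: alternative
-- what changed: Replaces A's per-position greedy rescan (growing a prefix string char-by-char and extending a suffix string across an inner j-loop with a break) by a direct monotone search for the longest suffix of s[:i+1] occurring as a substring of s[:i], proved equal to A's count.
import Mathlib
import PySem

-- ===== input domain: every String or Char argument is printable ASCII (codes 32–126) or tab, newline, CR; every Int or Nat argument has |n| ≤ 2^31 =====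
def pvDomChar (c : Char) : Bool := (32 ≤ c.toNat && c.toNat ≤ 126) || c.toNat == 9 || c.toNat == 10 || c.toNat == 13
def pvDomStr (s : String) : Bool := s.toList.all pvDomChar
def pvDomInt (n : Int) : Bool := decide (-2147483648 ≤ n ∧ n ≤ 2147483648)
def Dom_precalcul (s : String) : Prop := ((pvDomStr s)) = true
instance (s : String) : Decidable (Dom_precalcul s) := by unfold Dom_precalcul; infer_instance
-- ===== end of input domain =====

-- B replaces A's per-position greedy rescan by a direct monotone search for the longest
-- suffix of s[:i+1] occurring in s[:i] (alternative algorithm; same return value, proved below).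

-- ===== PORT A =====
-- inner loop over j ∈ range(i), state: suffix, prefix, count; early return models `break`.
-- s[j] / s[i] / s[i-len(suffix)] are always in range here, so List.getD is exact (= PySem pyGet?).
def precAInner (cs : List Char) (i : Nat) : List Char → List Char → Int → List Nat → Int
  | _, _, cnt, [] => cnt
  | suffix, prefx, cnt, j :: js =>
    let prefx' := prefx ++ [cs.getD j ' ']
    if PySem.Chars.isIn suffix prefx' then
      if (i : Int) - suffix.length > 0 then
        precAInner cs i (cs.getD (i - suffix.length) ' ' :: suffix) prefx' (cnt + 1) js
      else cnt + 1
    else precAInner cs i suffix prefx' cnt js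

def precalcul (s : String) : List Int :=
  let cs := s.toList
  (List.range' 1 (cs.length - 1)).foldl
    (fun carryOver i => carryOver ++ [precAInner cs i [cs.getD i ' '] [] 0 (List.range i)]) [0]

-- ===== PORT B =====
-- while m < i and s[i-m:i+1] in s[:i]: m += 1   (slices have nonnegative in-range bounds:
-- s[i-m:i+1] = (cs.drop (i-m)).take (m+1) and s[:i] = cs.take i, by PySem.List.slice_natCast / slice_to_natCast)
def altCount (cs : List Char) (i m : Nat) : Nat :=
  if m < i then
    if PySem.Chars.isIn ((cs.drop (i - m)).take (m + 1)) (cs.take i) then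
      altCount cs i (m + 1)
    else m
  else m
termination_by i - m

def precalcul_alt (s : String) : List Int :=
  let cs := s.toList
  (List.range' 1 (cs.length - 1)).foldl
    (fun carryOver i => carryOver ++ [(altCount cs i 0 : Int)]) [0]

-- ===== PRECONDITION & SPEC =====
def Spec_precalcul (s : String) (out : List Int) : Prop := out = precalcul_alt s
instance (s : String) (out : List Int) : Decidable (Spec_precalcul s out) := by unfold Spec_precalcul; infer_instance

-- ===== CLAIM (what is proved, stated in full; the proofs are below) =====
def Claim_equal_precalcul : Prop := ∀ (s : String), Dom_precalcul s → Spec_precalcul s (precalcul s)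

-- ===== LEMMAS AND PROOFS =====

-- the length-k suffix of s[:i+1], and "it occurs in s[:i]"
def sfxL (cs : List Char) (i k : Nat) : List Char := (cs.take (i+1)).drop (i+1-k)
def PP (cs : List Char) (i k : Nat) : Prop := sfxL cs i k <:+: cs.take i

theorem length_sfxL (cs : List Char) (i k : Nat) (hi : i < cs.length) (hk : k ≤ i+1) :
    (sfxL cs i k).length = k := by
  simp [sfxL]; omega

theorem sfxL_zero (cs : List Char) (i : Nat) : sfxL cs i 0 = [] := by
  simp [sfxL]

theorem sfx_succ (cs : List Char) (i k : Nat) (hi : i < cs.length) (hk : k ≤ i) :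
    sfxL cs i (k+1) = cs.getD (i - k) ' ' :: sfxL cs i k := by
  have hlen : (cs.take (i+1)).length = i+1 := by simp; omega
  have hlt : i - k < (cs.take (i+1)).length := by omega
  rw [sfxL, show i+1-(k+1) = i - k from by omega, List.drop_eq_getElem_cons hlt]
  congr 1
  · rw [List.getElem_take, List.getD_eq_getElem cs ' ' (by omega)]
  · rw [sfxL]; congr 1; omega

theorem take_getD_succ (cs : List Char) (j : Nat) (h : j < cs.length) :
    cs.take j ++ [cs.getD j ' '] = cs.take (j+1) := by
  rw [List.getD_eq_getElem cs ' ' h, List.take_add_one, List.getElem?_eq_getElem h]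
  rfl

theorem slice_eq_sfxL (cs : List Char) (i m : Nat) (hm : m ≤ i) :
    (cs.drop (i - m)).take (m+1) = sfxL cs i (m+1) := by
  rw [sfxL, show i+1-(m+1) = i - m from by omega, List.drop_take]
  congr 1; omega

theorem PP_mono (cs : List Char) (i : Nat) {t k : Nat} (ht : t ≤ k) (hk : k ≤ i+1)
    (h : PP cs i k) : PP cs i t := by
  have e : (sfxL cs i k).drop (k - t) = sfxL cs i t := by
    rw [sfxL, sfxL, List.drop_drop]; congr 1; omega
  exact (e ▸ List.drop_suffix (k - t) (sfxL cs i k)).isInfix.trans h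

theorem prefix_take_of_le {x l : List Char} {k : Nat} (h : x <+: l) (hk : x.length ≤ k) :
    x <+: l.take k := by
  have h1 := List.prefix_iff_eq_take.mp h
  rw [List.prefix_iff_eq_take, List.take_take, min_eq_left hk]
  exact h1

theorem infix_take_of_prefix_drop {x l : List Char} {r a : Nat}
    (h : x <+: l.drop r) (ha : r + x.length ≤ a) : x <:+: l.take a := by
  obtain ⟨z, hz⟩ := prefix_take_of_le h (show x.length ≤ a - r by omega)
  refine ⟨l.take r, z, ?_⟩
  rw [List.append_assoc, hz, ← List.take_add, show r + (a - r) = a from by omega]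

theorem infix_take_mono {x l : List Char} {a b : Nat} (h : x <:+: l.take a) (hab : a ≤ b) :
    x <:+: l.take b := by
  exact h.trans (List.take_isPrefix_take.mpr (Or.inl hab)).isInfix

theorem take_append_len {α : Type} (l₁ l₂ : List α) (i : Nat) :
    (l₁ ++ l₂).take (l₁.length + i) = l₁ ++ l₂.take i := by simp [List.take_append]

theorem drop_append_len {α : Type} (l₁ l₂ : List α) (i : Nat) :
    (l₁ ++ l₂).drop (l₁.length + i) = l₂.drop i := by simp [List.drop_append]

-- KEY combinatorial fact: if the length-m suffix of w occurs in w minus its last character,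
-- then for every d ≤ m the length-(m-d) suffix occurs in w minus its last d+1 characters.
theorem key (w : List Char) (m d : Nat) (hm : m < w.length) (hd : d ≤ m)
    (h : w.drop (w.length - m) <:+: w.take (w.length - 1)) :
    w.drop (w.length - (m - d)) <:+: w.take (w.length - 1 - d) := by
  obtain ⟨u, v, huv⟩ := h
  have hlen_sm : (w.drop (w.length - m)).length = m := by simp; omega
  have hlen : u.length + m + v.length = w.length - 1 := by
    have h2 := congrArg List.length huv
    simp only [List.length_append, List.length_take, hlen_sm] at h2
    omega
  by_cases hcase : d ≤ v.length
  · -- the occurrence already ends d before the cut: shorten it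
    have hsplit : w.drop (w.length - m) =
        (w.drop (w.length - m)).take d ++ w.drop (w.length - (m - d)) := by
      have e : (w.drop (w.length - m)).drop d = w.drop (w.length - (m - d)) := by
        rw [List.drop_drop]; congr 1; omega
      rw [← e, List.take_append_drop]
    refine ⟨u ++ (w.drop (w.length - m)).take d, v.take (v.length - d), ?_⟩
    have htk : w.take (w.length - 1 - d) = (w.take (w.length - 1)).take (w.length - 1 - d) := by
      rw [List.take_take, min_eq_left (by omega)]
    rw [htk, ← huv]
    have e2 : (u ++ w.drop (w.length - m) ++ v).take (w.length - 1 - d)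
        = u ++ w.drop (w.length - m) ++ v.take (v.length - d) := by
      rw [List.append_assoc]
      rw [show w.length - 1 - d = u.length + (m + (v.length - d)) from by omega]
      rw [take_append_len]
      rw [show m + (v.length - d) = (w.drop (w.length - m)).length + (v.length - d) from by rw [hlen_sm]]
      rw [take_append_len, List.append_assoc]
    rw [e2]
    conv_rhs => rw [hsplit]
    simp [List.append_assoc]
  · -- the occurrence touches the cut: the overlap forces a short period Δ; iterate it
    rw [not_le] at hcase
    have hn1 : 1 ≤ w.length := by omega
    have hw : w = u ++ w.drop (w.length - m) ++ (v ++ w.drop (w.length - 1)) := by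
      conv_lhs => rw [← List.take_append_drop (w.length - 1) w]
      rw [← huv]; simp [List.append_assoc]
    have hlt : (v ++ w.drop (w.length - 1)).length = v.length + 1 := by simp; omega
    have hB : ∀ k, k ≤ m → w.drop (w.length - (k + (v.length + 1)))
        = w.drop (w.length - k) ++ (v ++ w.drop (w.length - 1)) := by
      intro k hk
      have h1 : w.length - (k + (v.length + 1)) = u.length + (m - k) := by omega
      rw [h1]
      conv_lhs => rw [hw]
      rw [List.append_assoc, drop_append_len]
      rw [List.drop_append_of_le_length (by omega)]
      rw [List.drop_drop]
      congr 2
      omega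
    have hC : ∀ q, q * (v.length + 1) ≤ d + (v.length + 1) →
        w.drop (w.length - (m - d)) <+: w.drop (w.length - ((m - d) + q * (v.length + 1))) := by
      intro q
      induction q with
      | zero => intro _; simp
      | succ p ihp =>
        intro hq
        have hexp : (p + 1) * (v.length + 1) = p * (v.length + 1) + (v.length + 1) := by
          rw [add_mul, one_mul]
        have hple : p * (v.length + 1) ≤ d := by omega
        have e : (m - d) + (p + 1) * (v.length + 1)
            = ((m - d) + p * (v.length + 1)) + (v.length + 1) := by
          rw [hexp, Nat.add_assoc]
        rw [e, hB ((m - d) + p * (v.length + 1)) (by omega)]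
        exact (ihp (by omega)).trans (List.prefix_append _ _)
    have hΔpos : 0 < v.length + 1 := by omega
    have hqe : (d / (v.length + 1) + 1) * (v.length + 1)
        = d / (v.length + 1) * (v.length + 1) + (v.length + 1) := by
      rw [add_mul, one_mul]
    have hdm : d / (v.length + 1) * (v.length + 1) + d % (v.length + 1) = d := by
      rw [Nat.mul_comm]
      exact Nat.div_add_mod d (v.length + 1)
    have hmod := Nat.mod_lt d hΔpos
    have hq1 : (d / (v.length + 1) + 1) * (v.length + 1) ≤ d + (v.length + 1) := by omega
    have hq2 : d + 1 ≤ (d / (v.length + 1) + 1) * (v.length + 1) := by omega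
    have hpre := hC (d / (v.length + 1) + 1) hq1
    have hlen2 : (w.drop (w.length - (m - d))).length = m - d := by simp; omega
    refine infix_take_of_prefix_drop hpre ?_
    rw [hlen2]
    omega

-- KEY transported to sfxL/PP
theorem key' (cs : List Char) (i m d : Nat) (hi : i < cs.length) (hm : m ≤ i) (hd : d ≤ m)
    (h : PP cs i m) : sfxL cs i (m - d) <:+: cs.take (i - d) := by
  have hw : (cs.take (i+1)).length = i + 1 := by simp; omega
  have h1 : (cs.take (i+1)).drop ((cs.take (i+1)).length - m) = sfxL cs i m := by
    rw [hw, sfxL]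
  have h2 : (cs.take (i+1)).take ((cs.take (i+1)).length - 1) = cs.take i := by
    rw [hw, show i + 1 - 1 = i from rfl, List.take_take, min_eq_left (by omega)]
  have h3 := key (cs.take (i+1)) m d (by omega) hd (by rw [h1, h2]; exact h)
  rw [hw] at h3
  have h4 : (cs.take (i+1)).drop (i + 1 - (m - d)) = sfxL cs i (m - d) := rfl
  have h5 : (cs.take (i+1)).take (i + 1 - 1 - d) = cs.take (i - d) := by
    rw [show i + 1 - 1 - d = i - d from by omega, List.take_take, min_eq_left (by omega)]
  rw [h4, h5] at h3
  exact h3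

-- specification of B's while-loop
theorem alt_spec (cs : List Char) (i : Nat) :
    ∀ fuel m, i ≤ m + fuel → m ≤ i →
      m ≤ altCount cs i m ∧ altCount cs i m ≤ i ∧
      (∀ t, m ≤ t → t < altCount cs i m → PP cs i (t + 1)) ∧
      (altCount cs i m < i → ¬ PP cs i (altCount cs i m + 1)) := by
  intro fuel
  induction fuel with
  | zero =>
    intro m h1 h2
    have hmi : m = i := by omega
    rw [altCount, if_neg (by omega)]
    exact ⟨le_refl m, by omega, fun t ht1 ht2 => absurd ht2 (by omega), fun h => absurd h (by omega)⟩
  | succ f ih =>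
    intro m h1 h2
    rw [altCount]
    by_cases hmi : m < i
    · rw [if_pos hmi]
      by_cases hin : PySem.Chars.isIn ((cs.drop (i - m)).take (m + 1)) (cs.take i) = true
      · rw [if_pos hin]
        obtain ⟨ih1, ih2, ih3, ih4⟩ := ih (m+1) (by omega) (by omega)
        refine ⟨by omega, ih2, ?_, ih4⟩
        intro t ht1 ht2
        rcases Nat.eq_or_lt_of_le ht1 with he | hlt
        · rw [← he]
          rw [slice_eq_sfxL cs i m (by omega)] at hin
          exact (PySem.Chars.isIn_iff_infix _ _).mp hin
        · exact ih3 t (by omega) ht2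
      · rw [if_neg hin]
        refine ⟨le_refl m, h2, fun t ht1 ht2 => absurd ht2 (by omega), ?_⟩
        intro _
        rw [slice_eq_sfxL cs i m (by omega)] at hin
        exact fun hpp => hin ((PySem.Chars.isIn_iff_infix _ _).mpr hpp)
    · rw [if_neg hmi]
      exact ⟨le_refl m, h2, fun t ht1 ht2 => absurd ht2 (by omega), fun h => absurd h (by omega)⟩

theorem alt_le (cs : List Char) (i : Nat) : altCount cs i 0 ≤ i :=
  (alt_spec cs i i 0 (by omega) (by omega)).2.1

theorem alt_pass (cs : List Char) (i : Nat) :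
    ∀ t, t < altCount cs i 0 → PP cs i (t + 1) :=
  fun t ht => (alt_spec cs i i 0 (by omega) (by omega)).2.2.1 t (by omega) ht

theorem alt_fail (cs : List Char) (i : Nat) (h : altCount cs i 0 < i) :
    ¬ PP cs i (altCount cs i 0 + 1) :=
  (alt_spec cs i i 0 (by omega) (by omega)).2.2.2 h

-- invariant-based simulation of A's inner loop against B's value
theorem Ainner_main (cs : List Char) (i : Nat) (hi : i < cs.length) (_hi1 : 1 ≤ i) :
    ∀ (jrem j c : Nat), j + jrem = i → c ≤ j → c + 1 ≤ i →
      (∀ t, t ≤ c → PP cs i t) → altCount cs i 0 ≤ c + (i - j) →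
      precAInner cs i (sfxL cs i (c+1)) (cs.take j) (c : Int) (List.range' j jrem)
        = ((altCount cs i 0 : Nat) : Int) := by
  intro jrem
  induction jrem with
  | zero =>
    intro j c hj hc hc1 hPP hlow
    simp only [List.range'_zero, precAInner]
    have hup : altCount cs i 0 = c := by
      by_contra hne
      have hgB : altCount cs i 0 < c := by omega
      have hgBi : altCount cs i 0 < i := by omega
      exact alt_fail cs i hgBi (hPP _ (by omega))
    rw [hup]
  | succ jr ihr =>
    intro j c hj hc hc1 hPP hlow
    have hji : j < i := by omega
    have hjn : j < cs.length := by omega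
    rw [List.range'_succ]
    simp only [precAInner]
    rw [take_getD_succ cs j hjn]
    have hslen : (sfxL cs i (c+1)).length = c + 1 := length_sfxL cs i (c+1) hi (by omega)
    by_cases hin : PySem.Chars.isIn (sfxL cs i (c+1)) (cs.take (j+1)) = true
    · rw [if_pos hin]
      have hPPc1 : PP cs i (c+1) :=
        infix_take_mono ((PySem.Chars.isIn_iff_infix _ _).mp hin) (by omega)
      have hPP' : ∀ t, t ≤ c + 1 → PP cs i t := by
        intro t ht
        rcases Nat.lt_or_ge t (c+1) with h' | h'
        · exact hPP t (by omega)
        · have : t = c + 1 := by omega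
          rw [this]; exact hPPc1
      rw [hslen]
      by_cases hbr : (i : Int) - (c + 1 : Nat) > 0
      · rw [if_pos hbr]
        have hc2 : c + 2 ≤ i := by omega
        have hsfx : cs.getD (i - (c+1)) ' ' :: sfxL cs i (c+1) = sfxL cs i (c+2) :=
          (sfx_succ cs i (c+1) hi (by omega)).symm
        rw [hsfx]
        have := ihr (j+1) (c+1) (by omega) (by omega) (by omega) hPP' (by omega)
        rw [show ((c : Int) + 1) = ((c + 1 : Nat) : Int) from by push_cast; ring]
        exact this
      · rw [if_neg hbr]
        have hci : c + 1 = i := by omega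
        have hgB : altCount cs i 0 = i := by
          by_contra hne
          have h' : altCount cs i 0 < i := by
            have := alt_le cs i; omega
          exact alt_fail cs i h'
            (PP_mono cs i (by omega) (by omega) (hci ▸ hPPc1))
        rw [hgB]
        omega
    · rw [if_neg hin]
      have hlow' : altCount cs i 0 ≤ c + (i - (j+1)) := by
        by_contra hlowc
        have hgB1 : c + (i - j - 1) < altCount cs i 0 := by omega
        have hgBle : altCount cs i 0 ≤ i := alt_le cs i
        have hc1g : c + 1 ≤ altCount cs i 0 := by omega
        have hPPgB : PP cs i (altCount cs i 0) := by
          have := alt_pass cs i (altCount cs i 0 - 1) (by omega)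
          rw [show altCount cs i 0 - 1 + 1 = altCount cs i 0 from by omega] at this
          exact this
        have hkey := key' cs i (altCount cs i 0) (altCount cs i 0 - (c+1)) hi hgBle
          (by omega) hPPgB
        rw [show altCount cs i 0 - (altCount cs i 0 - (c+1)) = c + 1 from by omega] at hkey
        have hfit : i - (altCount cs i 0 - (c+1)) ≤ j + 1 := by omega
        exact hin ((PySem.Chars.isIn_iff_infix _ _).mpr (infix_take_mono hkey hfit))
      exact ihr (j+1) c (by omega) (by omega) hc1 hPP hlow'

theorem per_i (cs : List Char) (i : Nat) (hi1 : 1 ≤ i) (hi : i < cs.length) :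
    precAInner cs i [cs.getD i ' '] [] 0 (List.range i) = ((altCount cs i 0 : Nat) : Int) := by
  have h0 : [cs.getD i ' '] = sfxL cs i 1 := by
    rw [sfx_succ cs i 0 hi (by omega), sfxL_zero]
    simp
  rw [List.range_eq_range', h0]
  have h1 : ∀ t, t ≤ 0 → PP cs i t := by
    intro t ht
    have : t = 0 := by omega
    rw [this, PP, sfxL_zero]
    exact List.nil_infix
  have := Ainner_main cs i hi hi1 i 0 0 (by omega) (by omega) hi1 h1
    (by have := alt_le cs i; omega)
  simpa using this

-- ===== VERDICT (by name: the statement is the Claim_ definition above) =====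
theorem precalcul_spec : Claim_equal_precalcul := by
  intro s _
  unfold Spec_precalcul
  simp only [precalcul, precalcul_alt]
  have key_fold : ∀ (l : List Nat), (∀ x ∈ l, 1 ≤ x ∧ x < s.toList.length) → ∀ acc : List Int,
      l.foldl (fun carryOver i =>
        carryOver ++ [precAInner s.toList i [s.toList.getD i ' '] [] 0 (List.range i)]) acc =
      l.foldl (fun carryOver i => carryOver ++ [((altCount s.toList i 0 : Nat) : Int)]) acc := by
    intro l
    induction l with
    | nil => intro _ acc; rfl
    | cons x xs ihx =>
      intro h acc
      simp only [List.foldl_cons]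
      rw [per_i s.toList x (h x (by simp)).1 (h x (by simp)).2]
      exact ihx (fun y hy => h y (List.mem_cons_of_mem x hy)) _
  apply key_fold
  intro x hx
  rw [List.mem_range'_1] at hx
  omega
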